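-- pv_equiv track=rewrite | github.com/sprillo/web-app | autoTabber.py | getstringGuitarNotes
-- ===== SOURCE A (Python) =====
-- def getstringGuitarNotes(string):
-- 	res = []
-- 	n = len(string)
-- 	left = 0
-- 	while left < n:
-- 		# find end of current note
-- 		right = left + 1
-- 		while right + 1 < n and not(string[right + 1] in GuitarNote.allowedStrings):
-- 			right += 1
-- 		currentNote = string[left:right + 1]
-- 		res.append(currentNote)
-- 		left = right + 1
-- 	return res
--
-- class GuitarNote:
-- 	maxFrets = 22
-- 	allowedStrings = ('e','B','G','D','A','E')
-- 	allowedFingers = (1,2,3,4)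
-- 	notePitch = dict()
-- 	notePitch['E'] = 0
-- 	notePitch['A'] = notePitch['E'] + 5
-- 	notePitch['D'] = notePitch['A'] + 5
-- 	notePitch['G'] = notePitch['D'] + 5
-- 	notePitch['B'] = notePitch['G'] + 4
-- 	notePitch['e'] = notePitch['B'] + 5
-- 	stringLevel= dict()
-- 	stringLevel['E'] = 6
-- 	stringLevel['A'] = 5
-- 	stringLevel['D'] = 4
-- 	stringLevel['G'] = 3
-- 	stringLevel['B'] = 2
-- 	stringLevel['e'] = 1
--
-- 	@classmethod
-- 	def fromString(cls, stringToConstructFrom, time):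
-- 		assert len(stringToConstructFrom) >= 2
-- 		string = stringToConstructFrom[0]
-- 		fret = int(stringToConstructFrom[1:])
-- 		assert string in cls.allowedStrings, "inexistent string: %s"%string
-- 		#assert 0 <= fret and fret <= cls.maxFrets, "fret is out of range: %i"%fret #Downgrade this assert to allow e.g. 'E27E29E32'
-- 		return cls(string, fret, time)
-- 	def __init__(self, string, fret, time):
-- 		self.string = string
-- 		self.fret = fret
-- 		self.time = time
-- 	def string(self):
-- 		return self.string
-- 	def fret(self):
-- 		return self.fret
-- 	def __str__(self):
-- 		#return str(self.string) + str(self.fret)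
-- 		return str(self.stringLevel[self.string]) + "_" + str(self.fret)
-- 	def getPitch(self):
-- 		return GuitarNote.notePitch[self.string] + self.fret
-- 	def getStringLevel(self):
-- 		return GuitarNote.stringLevel[self.string]
-- ===== SOURCE B (Python) =====
-- def getstringGuitarNotes(string):
-- 	allowed = ('e', 'B', 'G', 'D', 'A', 'E')
-- 	res = []
-- 	buf = []
-- 	count = 0
-- 	for ch in string:
-- 		if count >= 2 and ch in allowed:
-- 			res.append(''.join(buf))
-- 			buf = [ch]
-- 			count = 1
-- 		else:
-- 			buf.append(ch)
-- 			count += 1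
-- 	if buf:
-- 		res.append(''.join(buf))
-- 	return res
-- ===== Notes on version B (the rewrite author's own statement) =====
-- stated objective: simpler
-- what changed: Replaced the two-pointer index/slice scan (outer loop over left, inner loop searching right, slicing string[left:right+1]) by one flat pass over the characters that maintains a current-note buffer and its length, flushing the buffer whenever a string-name character starts a new note after at least two buffered characters.
import Mathlib
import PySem

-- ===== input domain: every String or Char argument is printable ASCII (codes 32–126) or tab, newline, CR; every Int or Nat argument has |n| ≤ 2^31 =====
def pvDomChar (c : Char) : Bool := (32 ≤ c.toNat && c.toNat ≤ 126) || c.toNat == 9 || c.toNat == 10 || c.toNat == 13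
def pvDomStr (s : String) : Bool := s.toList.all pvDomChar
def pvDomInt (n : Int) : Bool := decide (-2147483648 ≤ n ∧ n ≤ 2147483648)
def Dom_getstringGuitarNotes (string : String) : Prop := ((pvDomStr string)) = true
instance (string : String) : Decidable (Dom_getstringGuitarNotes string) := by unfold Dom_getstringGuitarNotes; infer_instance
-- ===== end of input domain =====

-- B replaces A's two-pointer index/slice scan by one flat buffered pass over the characters (objective: simpler).

-- membership in GuitarNote.allowedStrings = ('e','B','G','D','A','E')
def pvAllowed (c : Char) : Bool :=
  c == 'e' || c == 'B' || c == 'G' || c == 'D' || c == 'A' || c == 'E'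

-- ===== PORT A =====
-- inner while loop: advance right while right+1 < n and string[right+1] not a string name
-- (the right+1 < n guard keeps the index in range, so getD is exact here)
def pvFindRight (s : List Char) (n right : Nat) : Nat :=
  if right + 1 < n ∧ (!pvAllowed (s.getD (right + 1) ' ')) = true then
    pvFindRight s n (right + 1)
  else right
termination_by n - right

theorem pvFindRight_ge (s : List Char) (n right : Nat) : right ≤ pvFindRight s n right := by
  unfold pvFindRight
  split
  · rename_i h
    have := pvFindRight_ge s n (right + 1)
    omega
  · exact Nat.le_refl _
termination_by n - right

-- outer while loop over left, accumulating res
def pvLoopA (s : List Char) (n left : Nat) (res : List String) : List String :=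
  if left < n then
    let right := pvFindRight s n (left + 1)
    -- string[left:right+1] with 0 ≤ left ≤ right+1: Python slice = drop then take
    let currentNote := String.mk ((s.drop left).take (right + 1 - left))
    pvLoopA s n (right + 1) (res ++ [currentNote])
  else res
termination_by n - left
decreasing_by
  have := pvFindRight_ge s n (left + 1)
  omega

def getstringGuitarNotes (string : String) : List String :=
  pvLoopA string.toList string.toList.length 0 []

-- ===== PORT B =====
-- state (res, buf, count): completed notes, current-note buffer, chars in the current note
def pvStepB (st : List String × List Char × Nat) (c : Char) : List String × List Char × Nat :=
  if 2 ≤ st.2.2 ∧ pvAllowed c = true then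
    (st.1 ++ [String.mk st.2.1], [c], 1)
  else
    (st.1, st.2.1 ++ [c], st.2.2 + 1)

def pvFinishB (st : List String × List Char × Nat) : List String :=
  if st.2.1 = [] then st.1 else st.1 ++ [String.mk st.2.1]

def getstringGuitarNotes_alt (string : String) : List String :=
  pvFinishB (string.toList.foldl pvStepB ([], [], 0))

-- ===== PRECONDITION & SPEC =====
def Spec_getstringGuitarNotes (string : String) (out : List String) : Prop := out = getstringGuitarNotes_alt string
instance (string : String) (out : List String) : Decidable (Spec_getstringGuitarNotes string out) := by unfold Spec_getstringGuitarNotes; infer_instance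

-- ===== CLAIM (what is proved, stated in full; the proofs are below) =====
def Claim_equal_getstringGuitarNotes : Prop := ∀ (string : String), Dom_getstringGuitarNotes string → Spec_getstringGuitarNotes string (getstringGuitarNotes string)

-- ===== LEMMAS AND PROOFS =====

-- reference splitter both ports are reduced to
def pvSplitRef : List Char → List String
  | [] => []
  | [a] => [String.mk [a]]
  | a :: b :: rest =>
    String.mk (a :: b :: rest.takeWhile (fun c => !pvAllowed c)) ::
      pvSplitRef (rest.dropWhile (fun c => !pvAllowed c))
termination_by cs => cs.length
decreasing_by
  have := List.length_dropWhile_le (p := fun c => !pvAllowed c) (l := rest)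
  simp only [List.length_cons]
  omega

theorem pvSplitRef_nil : pvSplitRef [] = [] := by rw [pvSplitRef]

theorem pvSplitRef_one (a : Char) : pvSplitRef [a] = [String.mk [a]] := by rw [pvSplitRef]

theorem pvSplitRef_cons₂ (a b : Char) (rest : List Char) :
    pvSplitRef (a :: b :: rest) =
      String.mk (a :: b :: rest.takeWhile (fun c => !pvAllowed c)) ::
        pvSplitRef (rest.dropWhile (fun c => !pvAllowed c)) := by rw [pvSplitRef]

theorem pvFindRight_char (s : List Char) (r : Nat) :
    pvFindRight s s.length r =
      r + (List.takeWhile (fun c => !pvAllowed c) (s.drop (r + 1))).length := by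
  rw [pvFindRight]
  by_cases h : r + 1 < s.length
  · have hget : s.getD (r + 1) ' ' = s[r + 1]'h := by
      simp [List.getD_eq_getElem?_getD, List.getElem?_eq_getElem h]
    have hdrop : s.drop (r + 1) = s[r + 1]'h :: s.drop (r + 1 + 1) := List.drop_eq_getElem_cons h
    by_cases hp : pvAllowed (s[r + 1]'h) = false
    · rw [if_pos ⟨h, by rw [hget, hp]; rfl⟩, pvFindRight_char s (r + 1), hdrop]
      simp only [List.takeWhile, hp, Bool.not_false, List.length_cons]
      omega
    · rw [if_neg (by rw [hget]; simp at hp ⊢; exact fun _ => hp), hdrop]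
      simp only [List.takeWhile]
      simp only [Bool.not_eq_false] at hp
      simp [hp]
  · rw [if_neg (by tauto)]
    have : s.drop (r + 1) = [] := List.drop_eq_nil_of_le (by omega)
    simp [this]
termination_by s.length - r
decreasing_by omega

theorem take_takeWhile_len {p : Char → Bool} (l : List Char) :
    l.take (l.takeWhile p).length = l.takeWhile p := by
  induction l with
  | nil => simp
  | cons a t ih =>
    by_cases h : p a = true
    · simp [List.takeWhile, h, ih]
    · simp at h; simp [List.takeWhile, h]

theorem drop_takeWhile_len {p : Char → Bool} (l : List Char) :
    l.drop (l.takeWhile p).length = l.dropWhile p := by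
  induction l with
  | nil => simp
  | cons a t ih =>
    by_cases h : p a = true
    · simp [List.takeWhile, List.dropWhile, h, ih]
    · simp at h; simp [List.takeWhile, List.dropWhile, h]

-- A's outer loop equals the reference splitter on the remaining suffix
theorem pvLoopA_ref (s : List Char) (left : Nat) (res : List String) :
    pvLoopA s s.length left res = res ++ pvSplitRef (s.drop left) := by
  rw [pvLoopA]
  by_cases h : left < s.length
  · rw [if_pos h, pvFindRight_char]
    set p : Char → Bool := fun c => !pvAllowed c with hp
    have hdropl : s.drop left = s[left]'h :: s.drop (left + 1) := List.drop_eq_getElem_cons h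
    by_cases h1 : left + 1 < s.length
    · have hdrop1 : s.drop (left + 1) = s[left + 1]'h1 :: s.drop (left + 2) :=
        List.drop_eq_getElem_cons h1
      set rest := s.drop (left + 2) with hrest
      set t := (rest.takeWhile p).length with ht
      rw [pvLoopA_ref s (left + 1 + t + 1)]
      have htk : (s.drop left).take (left + 1 + t + 1 - left) =
          s[left]'h :: s[left + 1]'h1 :: rest.takeWhile p := by
        have h2 : left + 1 + t + 1 - left = t + 2 := by omega
        rw [h2, hdropl, hdrop1]
        simp only [List.take_succ_cons]
        rw [ht, take_takeWhile_len]
      have hdr : s.drop (left + 1 + t + 1) = rest.dropWhile p := by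
        rw [← drop_takeWhile_len (p := p) (l := rest), ← ht, hrest, List.drop_drop]
        congr 1
        omega
      rw [htk, hdr, hdropl, hdrop1, pvSplitRef_cons₂]
      simp
      exact ⟨rfl, rfl⟩
    · -- left is the last index: the final note is the single last character
      have hd1 : s.drop (left + 1) = [] := List.drop_eq_nil_of_le (by omega)
      rw [hd1] at hdropl
      have hd15 : s.drop (left + 1 + 1) = [] := List.drop_eq_nil_of_le (by omega)
      rw [hd15]
      simp only [List.takeWhile_nil, List.length_nil, Nat.add_zero]
      rw [pvLoopA_ref s (left + 1 + 1), hd15, hdropl]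
      have h4 : left + 1 + 1 - left = 2 := by omega
      rw [h4]
      simp [pvSplitRef_nil, pvSplitRef_one]
  · rw [if_neg h]
    have : s.drop left = [] := List.drop_eq_nil_of_le (by omega)
    simp [this, pvSplitRef_nil]
termination_by s.length - left
decreasing_by all_goals omega

-- B's fold equals the reference splitter: joint invariant for a 1-char buffer
-- (just after a boundary / the first char) and a ≥2-char buffer (extension mode)
theorem pvFoldB_ref (N : Nat) :
    (∀ cs : List Char, cs.length ≤ N → ∀ res a,
      pvFinishB (cs.foldl pvStepB (res, [a], 1)) = res ++ pvSplitRef (a :: cs)) ∧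
    (∀ cs : List Char, cs.length ≤ N → ∀ res buf, 2 ≤ buf.length →
      pvFinishB (cs.foldl pvStepB (res, buf, buf.length)) =
        res ++ (String.mk (buf ++ cs.takeWhile (fun c => !pvAllowed c)) ::
          pvSplitRef (cs.dropWhile (fun c => !pvAllowed c)))) := by
  induction N with
  | zero =>
    constructor
    · intro cs hcs res a
      have : cs = [] := List.eq_nil_of_length_eq_zero (by omega)
      subst this; simp [pvFinishB, pvSplitRef_one]
    · intro cs hcs res buf hbuf
      have : cs = [] := List.eq_nil_of_length_eq_zero (by omega)
      subst this
      simp [pvFinishB, pvSplitRef_nil, List.ne_nil_of_length_pos (by omega : 0 < buf.length)]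
  | succ n ih =>
    obtain ⟨ih1, ih2⟩ := ih
    have step2 : ∀ cs : List Char, cs.length ≤ n + 1 → ∀ res buf, 2 ≤ buf.length →
        pvFinishB (cs.foldl pvStepB (res, buf, buf.length)) =
          res ++ (String.mk (buf ++ cs.takeWhile (fun c => !pvAllowed c)) ::
            pvSplitRef (cs.dropWhile (fun c => !pvAllowed c))) := by
      intro cs hcs res buf hbuf
      match cs with
      | [] =>
        simp [pvFinishB, pvSplitRef_nil, List.ne_nil_of_length_pos (by omega : 0 < buf.length)]
      | c :: rest =>
        simp only [List.length_cons] at hcs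
        by_cases hc : pvAllowed c = true
        · rw [List.foldl_cons]
          have hs : pvStepB (res, buf, buf.length) c = (res ++ [String.mk buf], [c], 1) := by
            simp [pvStepB, hbuf, hc]
          rw [hs, ih1 rest (by omega)]
          simp [List.takeWhile, List.dropWhile, hc]
        · simp only [Bool.not_eq_true] at hc
          rw [List.foldl_cons]
          have hs : pvStepB (res, buf, buf.length) c = (res, buf ++ [c], (buf ++ [c]).length) := by
            simp [pvStepB, hc]
          rw [hs, ih2 rest (by omega) res (buf ++ [c]) (by simp; omega)]
          simp [List.takeWhile, List.dropWhile, hc]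
    refine ⟨?_, step2⟩
    intro cs hcs res a
    match cs with
    | [] => simp [pvFinishB, pvSplitRef_one]
    | b :: rest =>
      simp only [List.length_cons] at hcs
      rw [List.foldl_cons]
      have hs : pvStepB (res, [a], 1) b = (res, [a, b], 2) := by
        simp [pvStepB]
      rw [hs]
      have h2 := step2 rest (by omega) res [a, b] (by simp)
      simp only [List.length_cons, List.length_nil] at h2
      rw [h2, pvSplitRef_cons₂]
      simp

theorem altB_ref (s : List Char) : pvFinishB (s.foldl pvStepB ([], [], 0)) = pvSplitRef s := by
  match s with
  | [] => simp [pvFinishB, pvSplitRef_nil]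
  | a :: cs =>
    rw [List.foldl_cons]
    have hs : pvStepB ([], [], 0) a = ([], [a], 1) := by simp [pvStepB]
    rw [hs, (pvFoldB_ref cs.length).1 cs (Nat.le_refl _) [] a]
    simp

-- ===== VERDICT (by name: the statement is the Claim_ definition above) =====
theorem getstringGuitarNotes_spec : Claim_equal_getstringGuitarNotes := by
  intro s _
  unfold Spec_getstringGuitarNotes getstringGuitarNotes getstringGuitarNotes_alt
  rw [altB_ref, pvLoopA_ref]
  simp
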